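-- pv_equiv track=rewrite | github.com/chocomacaroon/baekjoon | 프로그래머스/2/42584. 주식가격/주식가격.py | solution
-- ===== SOURCE A (Python) =====
-- def solution(prices):
--     answer = []
--     stk = []
--     period = [len(prices)-i-1 for i in range(len(prices))]
--     for i,c in enumerate(prices):
--         if stk and stk[-1][1] > c:
--             while stk and stk[-1][1] > c:
--                 ii,cc = stk.pop()
--                 period[ii] = i-ii
--         stk.append((i,c))
--     return period
-- ===== SOURCE B (Python) =====
-- def solution(prices):
--     # Naive forward rescan: for each day, count seconds until the first strictly
--     # lower later price (inclusive), or until the end if none.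
--     answer = []
--     for i in range(len(prices)):
--         counter = 0
--         for p in prices[i + 1:]:
--             counter += 1
--             if p < prices[i]:
--                 break
--         answer.append(counter)
--     return answer
-- ===== Notes on version B (the rewrite author's own statement) =====
-- stated objective: alternative
-- what changed: Replaces A's single-pass monotonic-stack with in-place period updates by a stackless nested scan that, for each index, rescans forward and counts elements up to and including the first strictly lower price (defaulting to the suffix length).
import Mathlib
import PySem

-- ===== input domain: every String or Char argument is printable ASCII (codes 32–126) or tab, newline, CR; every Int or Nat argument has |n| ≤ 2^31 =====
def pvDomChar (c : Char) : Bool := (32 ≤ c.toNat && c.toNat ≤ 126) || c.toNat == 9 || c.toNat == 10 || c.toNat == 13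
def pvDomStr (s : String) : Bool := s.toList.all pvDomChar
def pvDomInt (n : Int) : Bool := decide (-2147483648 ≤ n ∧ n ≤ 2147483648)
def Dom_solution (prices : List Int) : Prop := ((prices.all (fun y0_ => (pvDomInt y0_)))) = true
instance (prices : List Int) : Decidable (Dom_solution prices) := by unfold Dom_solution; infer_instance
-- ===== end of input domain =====

-- B replaces A's single-pass monotonic-stack algorithm by a stackless nested
-- forward rescan from each index (alternative decomposition, not faster).

-- ===== PORT A =====
-- A's stack: Lean list head = Python stk[-1] (the top).  Enumerate indices are
-- the Nat counters 0,1,2,…; `period[ii] = i - ii` is List.set (ii < len(period)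
-- always, since ii was an enumerate index).  The `while stk and stk[-1][1] > c`
-- loop (its redundant outer `if` guard included) is popA.
def popA (i : Nat) (c : Int) : List (Nat × Int) → List Int → List (Nat × Int) × List Int
  | [], per => ([], per)
  | (ii, cc) :: s, per =>
      if c < cc then popA i c s (per.set ii ((i : Int) - (ii : Int)))
      else ((ii, cc) :: s, per)

-- `for i, c in enumerate(prices): …; stk.append((i, c))`
def loopA : List Int → Nat → List (Nat × Int) → List Int → List Int
  | [], _, _, per => per
  | c :: rest, i, stk, per =>
      match popA i c stk per with
      | (stk', per') => loopA rest (i + 1) ((i, c) :: stk') per'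

-- period = [len(prices)-i-1 for i in range(len(prices))], then the loop; return period
def solution (prices : List Int) : List Int :=
  loopA prices 0 []
    ((List.range prices.length).map (fun i : Nat => (prices.length : Int) - (i : Int) - 1))

-- ===== PORT B =====
-- inner loop: `counter += 1; if p < prices[i]: break` over prices[i+1:]
def countB (p : Int) : List Int → Int
  | [] => 0
  | x :: rest => if x < p then 1 else 1 + countB p rest

-- outer loop: for i in range(len(prices)), append the inner count
def solution_alt (prices : List Int) : List Int :=
  (List.range prices.length).map (fun i => countB (prices.getD i 0) (prices.drop (i + 1)))

-- ===== PRECONDITION & SPEC =====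
def Spec_solution (prices : List Int) (out : List Int) : Prop := out = solution_alt prices
instance (prices : List Int) (out : List Int) : Decidable (Spec_solution prices out) := by unfold Spec_solution; infer_instance

-- ===== CLAIM (what is proved, stated in full; the proofs are below) =====
def Claim_equal_solution : Prop := ∀ (prices : List Int), Dom_solution prices → Spec_solution prices (solution prices)

-- ===== LEMMAS AND PROOFS =====

-- the part of prices strictly after index j among the first k elements
def seg (ps : List Int) (k j : Nat) : List Int := (ps.take k).drop (j + 1)

-- value held in period[j] after the first k elements have been processed
def pval (ps : List Int) (k j : Nat) : Int :=
  match (seg ps k j).findIdx? (fun x => decide (x < ps.getD j 0)) with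
  | some m => (m : Int) + 1
  | none => (ps.length : Int) - 1 - (j : Int)

-- invariant of A's stack after the first k elements have been processed
def StkInv (ps : List Int) (k : Nat) (stk : List (Nat × Int)) : Prop :=
  stk.Pairwise (fun a b => b.1 < a.1) ∧
  stk.Pairwise (fun a b => b.2 ≤ a.2) ∧
  (∀ p ∈ stk, p.1 < k ∧ p.2 = ps.getD p.1 0 ∧
      (seg ps k p.1).findIdx? (fun x => decide (x < p.2)) = none) ∧
  (∀ j, j < k → (seg ps k j).findIdx? (fun x => decide (x < ps.getD j 0)) = none →
      (j, ps.getD j 0) ∈ stk)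

lemma popA_spec (i : Nat) (c : Int) :
    ∀ (stk : List (Nat × Int)) (per : List Int),
      popA i c stk per =
        (stk.dropWhile (fun p => decide (c < p.2)),
         (stk.takeWhile (fun p => decide (c < p.2))).foldl
           (fun pr p => pr.set p.1 ((i : Int) - (p.1 : Int))) per) := by
  intro stk
  induction stk with
  | nil => intro per; simp [popA]
  | cons p s ih =>
    intro per
    obtain ⟨ii, cc⟩ := p
    by_cases h : c < cc
    · simp [popA, h, ih]
    · simp [popA, h]

lemma mem_dropWhile_val_le (c : Int) :
    ∀ (stk : List (Nat × Int)), stk.Pairwise (fun a b => b.2 ≤ a.2) →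
      ∀ p ∈ stk.dropWhile (fun p => decide (c < p.2)), p.2 ≤ c := by
  intro stk
  induction stk with
  | nil => simp
  | cons a s ih =>
    intro hpw p hp
    rw [List.pairwise_cons] at hpw
    by_cases h : c < a.2
    · rw [List.dropWhile_cons_of_pos (by simpa using h)] at hp
      exact ih hpw.2 p hp
    · rw [List.dropWhile_cons_of_neg (by simpa using h)] at hp
      rcases List.mem_cons.mp hp with rfl | hp
      · omega
      · have := hpw.1 p hp; omega

lemma mem_dropWhile_of_mem {α : Type} (q : α → Bool) (l : List α) (x : α)
    (hx : x ∈ l) (hq : ¬ q x = true) : x ∈ l.dropWhile q := by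
  rcases (by rw [List.takeWhile_append_dropWhile] at *; exact hx :
      x ∈ l.takeWhile q ++ l.dropWhile q) with h
  rcases List.mem_append.mp h with h | h
  · exact absurd (List.mem_takeWhile_imp h) hq
  · exact h

lemma mem_takeWhile_of_mem (c : Int) (stk : List (Nat × Int))
    (hpw : stk.Pairwise (fun a b => b.2 ≤ a.2)) (p : Nat × Int)
    (hp : p ∈ stk) (h : c < p.2) : p ∈ stk.takeWhile (fun p => decide (c < p.2)) := by
  have := List.takeWhile_append_dropWhile (p := fun p : Nat × Int => decide (c < p.2)) (l := stk)
  rw [← this] at hp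
  rcases List.mem_append.mp hp with h' | h'
  · exact h'
  · exact absurd (mem_dropWhile_val_le c stk hpw p h') (by omega)

lemma set_map_range (f : Nat → Int) (n j : Nat) (v : Int) :
    ((List.range n).map f).set j v = (List.range n).map (fun x => if x = j then v else f x) := by
  apply List.ext_getElem
  · simp
  · intro m h1 h2
    simp only [List.getElem_set, List.getElem_map, List.getElem_range]
    by_cases hm : j = m
    · subst hm; simp
    · rw [if_neg hm, if_neg (fun h => hm h.symm)]

lemma foldl_set_map_range (n : Nat) (v : Nat → Int) :
    ∀ (L : List (Nat × Int)) (f : Nat → Int),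
      L.foldl (fun pr p => pr.set p.1 (v p.1)) ((List.range n).map f)
        = (List.range n).map (fun x => if x ∈ L.map Prod.fst then v x else f x) := by
  intro L
  induction L with
  | nil => intro f; simp
  | cons p L ih =>
    intro f
    simp only [List.foldl_cons]
    rw [set_map_range f n p.1 (v p.1)]
    rw [ih _]
    apply List.map_congr_left
    intro x _
    by_cases h1 : x ∈ L.map Prod.fst
    · simp [h1]
    · by_cases h2 : x = p.1
      · subst h2; simp [h1]
      · simp [h1, h2]

-- extending the processed prefix by one element appends it to every earlier segment
lemma seg_succ (ps : List Int) (k j : Nat) (c : Int) (hk : ps.drop k = c :: (ps.drop (k + 1)))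
    (hj : j < k) : seg ps (k + 1) j = seg ps k j ++ [c] := by
  have hkl : k < ps.length := by
    by_contra h
    rw [List.drop_eq_nil_iff.mpr (by omega)] at hk
    simp at hk
  have hget : ps[k]? = some c := by
    have h0 : (ps.drop k)[0]? = some c := by rw [hk]; rfl
    rw [List.getElem?_drop] at h0
    simpa using h0
  unfold seg
  rw [List.take_add_one, hget]
  simp only [Option.toList_some]
  rw [List.drop_append_of_le_length (by simp; omega)]

lemma seg_big (ps : List Int) (k j : Nat) (hj : k ≤ j + 1) : seg ps k j = [] := by
  unfold seg
  rw [List.drop_eq_nil_iff]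
  simp
  omega

lemma getD_of_drop (ps : List Int) (k : Nat) (c : Int) (hk : ps.drop k = c :: (ps.drop (k + 1))) :
    ps.getD k 0 = c := by
  have h0 : (ps.drop k)[0]? = some c := by rw [hk]; rfl
  rw [List.getElem?_drop] at h0
  rw [List.getD_eq_getElem?_getD]
  simp at h0
  rw [h0]
  rfl

-- the per-list after the pops of step k is exactly the k+1 snapshot
lemma per_update (ps : List Int) (k : Nat) (c : Int) (stk : List (Nat × Int))
    (hk : ps.drop k = c :: (ps.drop (k + 1))) (hinv : StkInv ps k stk) :
    (stk.takeWhile (fun p => decide (c < p.2))).foldl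
        (fun pr p => pr.set p.1 ((k : Int) - (p.1 : Int)))
        ((List.range ps.length).map (pval ps k))
      = (List.range ps.length).map (pval ps (k + 1)) := by
  obtain ⟨hidx, hval, hmem, hcomp⟩ := hinv
  have hkl : k < ps.length := by
    by_contra h
    rw [List.drop_eq_nil_iff.mpr (by omega)] at hk
    simp at hk
  have hsub := List.takeWhile_sublist (l := stk) (fun p => decide (c < p.2))
  rw [foldl_set_map_range ps.length (fun x => (k : Int) - (x : Int)) _ _]
  apply List.map_congr_left
  intro j hj
  rw [List.mem_range] at hj
  have hpop : j ∈ (stk.takeWhile (fun p => decide (c < p.2))).map Prod.fst ↔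
      (j < k ∧ (seg ps k j).findIdx? (fun x => decide (x < ps.getD j 0)) = none ∧
        c < ps.getD j 0) := by
    constructor
    · intro h
      rcases List.mem_map.mp h with ⟨p, hp, rfl⟩
      have hpred := List.mem_takeWhile_imp hp
      have h3 := hmem p (hsub.mem hp)
      simp only [decide_eq_true_eq] at hpred
      refine ⟨h3.1, by rw [← h3.2.1]; exact h3.2.2, by rw [← h3.2.1]; exact hpred⟩
    · rintro ⟨h1, h2, h3⟩
      have hin := hcomp j h1 h2
      have := mem_takeWhile_of_mem c stk hval (j, ps.getD j 0) hin (by simpa using h3)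
      exact List.mem_map.mpr ⟨(j, ps.getD j 0), this, rfl⟩
  by_cases hjk : j < k
  · have hseg := seg_succ ps k j c hk hjk
    rcases hfi : (seg ps k j).findIdx? (fun x => decide (x < ps.getD j 0)) with _ | m
    · have happ : (seg ps (k + 1) j).findIdx? (fun x => decide (x < ps.getD j 0))
          = if c < ps.getD j 0 then some (seg ps k j).length else none := by
        rw [hseg, List.findIdx?_append, hfi]
        simp
      by_cases hc : c < ps.getD j 0
      · rw [if_pos (hpop.mpr ⟨hjk, hfi, hc⟩)]
        unfold pval
        rw [happ, if_pos hc]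
        have hlen : (seg ps k j).length = k - (j + 1) := by
          unfold seg; simp; omega
        rw [hlen]
        simp only
        omega
      · rw [if_neg (fun h => by
          rcases hpop.mp h with ⟨_, _, h3⟩; exact hc h3)]
        unfold pval
        rw [happ, if_neg hc, hfi]
    · rw [if_neg (fun h => by
        rcases hpop.mp h with ⟨_, h2, _⟩; rw [hfi] at h2; simp at h2)]
      unfold pval
      rw [hseg, List.findIdx?_append, hfi]
      simp
  · rw [if_neg (fun h => by rcases hpop.mp h with ⟨h1, _, _⟩; exact hjk h1)]
    unfold pval
    rw [seg_big ps k j (by omega), seg_big ps (k + 1) j (by omega)]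

-- the stack invariant is preserved by one step of the loop
lemma stkinv_step (ps : List Int) (k : Nat) (c : Int) (stk : List (Nat × Int))
    (hk : ps.drop k = c :: (ps.drop (k + 1))) (hinv : StkInv ps k stk) :
    StkInv ps (k + 1) ((k, c) :: stk.dropWhile (fun p => decide (c < p.2))) := by
  obtain ⟨hidx, hval, hmem, hcomp⟩ := hinv
  have hc : ps.getD k 0 = c := getD_of_drop ps k c hk
  have hsub := List.dropWhile_sublist (l := stk) (fun p => decide (c < p.2))
  refine ⟨?_, ?_, ?_, ?_⟩
  · rw [List.pairwise_cons]
    exact ⟨fun p hp => (hmem p (hsub.mem hp)).1, hidx.sublist hsub⟩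
  · rw [List.pairwise_cons]
    exact ⟨fun p hp => mem_dropWhile_val_le c stk hval p hp, hval.sublist hsub⟩
  · intro p hp
    rcases List.mem_cons.mp hp with rfl | hp
    · refine ⟨by omega, hc.symm, ?_⟩
      rw [seg_big ps (k + 1) k (by omega)]
      simp
    · have h3 := hmem p (hsub.mem hp)
      have hle : p.2 ≤ c := mem_dropWhile_val_le c stk hval p hp
      refine ⟨by omega, h3.2.1, ?_⟩
      rw [seg_succ ps k p.1 c hk h3.1, List.findIdx?_append, h3.2.2]
      simp
      omega
  · intro j hj hnone
    by_cases hjk : j < k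
    · rw [seg_succ ps k j c hk hjk, List.findIdx?_append] at hnone
      rcases hfi : (seg ps k j).findIdx? (fun x => decide (x < ps.getD j 0)) with _ | m
      · rw [hfi] at hnone
        simp at hnone
        have := hcomp j hjk hfi
        exact List.mem_cons.mpr (Or.inr
          (mem_dropWhile_of_mem _ stk _ this (by simpa using hnone)))
      · rw [hfi] at hnone
        simp at hnone
    · have : j = k := by omega
      subst this
      rw [hc]
      exact List.mem_cons.mpr (Or.inl rfl)

lemma loopA_main (ps : List Int) :
    ∀ (rest : List Int) (k : Nat) (stk : List (Nat × Int)),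
      ps.drop k = rest → StkInv ps k stk →
      loopA rest k stk ((List.range ps.length).map (pval ps k))
        = (List.range ps.length).map (pval ps ps.length) := by
  intro rest
  induction rest with
  | nil =>
    intro k stk hdrop _
    have hk : ps.length ≤ k := List.drop_eq_nil_iff.mp hdrop
    simp only [loopA]
    apply List.map_congr_left
    intro j hj
    unfold pval seg
    rw [List.take_of_length_le hk, List.take_length]
  | cons c rest ih =>
    intro k stk hdrop hinv
    have hrest : ps.drop (k + 1) = rest := by
      have := congrArg List.tail hdrop
      simpa [List.tail_drop] using this
    rw [← hrest] at hdrop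
    simp only [loopA]
    rw [popA_spec]
    simp only
    rw [per_update ps k c stk hdrop hinv]
    exact ih (k + 1) _ hrest (stkinv_step ps k c stk hdrop hinv)

lemma countB_eq (p : Int) :
    ∀ (l : List Int), countB p l =
      match l.findIdx? (fun x => decide (x < p)) with
      | some m => (m : Int) + 1
      | none => (l.length : Int) := by
  intro l
  induction l with
  | nil => simp [countB]
  | cons x rest ih =>
    by_cases h : x < p
    · simp [countB, h, List.findIdx?_cons]
    · simp only [countB, List.findIdx?_cons, decide_eq_true_eq, h, if_false, ih]
      rcases hfi : rest.findIdx? (fun x => decide (x < p)) with _ | m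
      · simp; ring
      · simp; ring

lemma alt_eq_pval (ps : List Int) :
    solution_alt ps = (List.range ps.length).map (pval ps ps.length) := by
  unfold solution_alt
  apply List.map_congr_left
  intro j hj
  rw [List.mem_range] at hj
  rw [countB_eq]
  unfold pval seg
  rw [List.take_length]
  rcases hfi : (ps.drop (j + 1)).findIdx? (fun x => decide (x < ps.getD j 0)) with _ | m
  · simp only
    rw [List.length_drop]
    push_cast [Nat.cast_sub (by omega : j + 1 ≤ ps.length)]
    ring
  · simp only

-- ===== VERDICT (by name: the statement is the Claim_ definition above) =====
theorem solution_spec : Claim_equal_solution := by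
  intro ps _
  unfold Spec_solution solution
  have hinit : (List.range ps.length).map (fun i : Nat => (ps.length : Int) - (i : Int) - 1)
      = (List.range ps.length).map (pval ps 0) := by
    apply List.map_congr_left
    intro j _
    unfold pval seg
    simp
    omega
  rw [hinit, loopA_main ps ps 0 [] (by simp)
    ⟨List.Pairwise.nil, List.Pairwise.nil, by simp, by omega⟩, alt_eq_pval]
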